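-- pv_equiv track=rewrite | github.com/mukundesh/docInt | docint/pipeline/learn_ner.py | get_ner_tags
-- ===== SOURCE A (Python) =====
-- def get_ner_tags(labels):
--     ner_tags = []
--     for (idx, label) in enumerate(labels):
--         if label is None:
--             ner_tags.append("O")
--             continue
--
--         stub = "OFF" if label == "officer" else "DEP"
--         if idx == 0 or label != labels[idx - 1]:
--             ner_tags.append(f"B-{stub}")
--         else:
--             ner_tags.append(f"I-{stub}")
--     return ner_tags
-- ===== SOURCE B (Python) =====
-- def get_ner_tags(labels):
--     # Run-based rewrite: scan maximal runs of equal labels with two pointers,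
--     # emit all tags for a run at once (B- head + I- rest, or all "O").
--     tags = []
--     i = 0
--     n = len(labels)
--     while i < n:
--         key = labels[i]
--         j = i + 1
--         while j < n and labels[j] == key:
--             j += 1
--         if key is None:
--             tags.extend("O" for _ in range(i, j))
--         else:
--             stub = "OFF" if key == "officer" else "DEP"
--             tags.append(f"B-{stub}")
--             tags.extend(f"I-{stub}" for _ in range(i + 1, j))
--         i = j
--     return tags
-- ===== Notes on version B (the rewrite author's own statement) =====
-- stated objective: alternative
-- what changed: Replaced the per-index loop that re-reads labels[idx-1] for each element with a two-pointer scan over maximal runs of equal labels, emitting each run's tags (B- head, I- rest, or all O) in one block.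
import Mathlib
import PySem

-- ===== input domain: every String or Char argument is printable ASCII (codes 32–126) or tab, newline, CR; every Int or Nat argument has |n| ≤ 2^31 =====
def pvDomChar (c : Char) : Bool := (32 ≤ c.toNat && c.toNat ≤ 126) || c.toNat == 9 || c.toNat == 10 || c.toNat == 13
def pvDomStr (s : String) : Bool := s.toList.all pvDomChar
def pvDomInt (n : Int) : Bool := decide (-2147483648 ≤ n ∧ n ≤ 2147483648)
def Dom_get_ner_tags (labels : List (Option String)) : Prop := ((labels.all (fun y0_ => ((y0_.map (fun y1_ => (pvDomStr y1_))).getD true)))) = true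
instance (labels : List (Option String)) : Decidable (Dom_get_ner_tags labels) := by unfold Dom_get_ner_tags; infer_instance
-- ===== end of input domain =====

-- B replaces the per-index loop comparing labels[idx-1] with a two-pointer scan
-- over maximal runs of equal labels, emitting each run's tags in one block (alternative).

-- ===== PORT A =====
-- literal port of A: enumerate with index, compare with labels[idx-1] via pyGet?;
-- the loop body is the helper pvStepA, the loop is a foldl over enumerate(labels)
def pvStepA (labels : List (Option String)) (ner_tags : List String) (p : Int × Option String) : List String :=
  match p with
  | (idx, label) =>
    match label with
    | none => ner_tags ++ ["O"]
    | some l =>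
      let stub := if l = "officer" then "OFF" else "DEP"
      if idx = 0 ∨ PySem.List.pyGet? labels (idx - 1) ≠ some (some l) then
        ner_tags ++ ["B-" ++ stub]
      else
        ner_tags ++ ["I-" ++ stub]

def get_ner_tags (labels : List (Option String)) : List String :=
  (PySem.List.enumerate labels).foldl (pvStepA labels) []

-- ===== PORT B =====
-- port of Source B: each outer iteration scans the maximal run of labels equal to the
-- head (the inner `while labels[j] == key` = takeWhile/dropWhile), emits the run's
-- tags in one block, then continues after the run.
def get_ner_tags_alt (labels : List (Option String)) : List String :=
  match labels with
  | [] => []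
  | key :: rest =>
    let t := rest.takeWhile (· = key)
    let r := rest.dropWhile (· = key)
    (match key with
     | none => List.replicate (1 + t.length) "O"
     | some l =>
       let stub := if l = "officer" then "OFF" else "DEP"
       ("B-" ++ stub) :: List.replicate t.length ("I-" ++ stub)) ++ get_ner_tags_alt r
termination_by labels.length
decreasing_by
  have h := List.length_dropWhile_le (· = key) rest
  simp only [List.length_cons]
  omega

-- ===== PRECONDITION & SPEC =====
def Spec_get_ner_tags (labels : List (Option String)) (out : List String) : Prop := out = get_ner_tags_alt labels
instance (labels : List (Option String)) (out : List String) : Decidable (Spec_get_ner_tags labels out) := by unfold Spec_get_ner_tags; infer_instance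

-- ===== CLAIM (what is proved, stated in full; the proofs are below) =====
def Claim_equal_get_ner_tags : Prop := ∀ (labels : List (Option String)), Dom_get_ner_tags labels → Spec_get_ner_tags labels (get_ner_tags labels)

-- ===== LEMMAS AND PROOFS =====

def pvStub (l : String) : String := if l = "officer" then "OFF" else "DEP"

-- reference: one-element-at-a-time tagging carrying the previous label (none = position 0)
def pvRef : Option (Option String) → List (Option String) → List String
  | _, [] => []
  | prev, x :: xs =>
    (match x with
     | none => "O"
     | some l => if prev = some (some l) then "I-" ++ pvStub l else "B-" ++ pvStub l)
      :: pvRef (some x) xs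

lemma pvRef_congr (xs : List (Option String)) (p q : Option (Option String))
    (h : ∀ l, xs.head? = some (some l) → (p = some (some l) ↔ q = some (some l))) :
    pvRef p xs = pvRef q xs := by
  cases xs with
  | nil => rfl
  | cons x xs =>
    cases x with
    | none => rfl
    | some l =>
      have := h l (by rfl)
      simp only [pvRef]
      congr 1
      by_cases hp : p = some (some l)
      · rw [if_pos hp, if_pos (this.mp hp)]
      · rw [if_neg hp, if_neg (fun hq => hp (this.mpr hq))]

lemma pvRef_run (t : List (Option String)) (x : Option String) (xs : List (Option String))
    (ht : ∀ y ∈ t, y = x) :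
    pvRef (some x) (t ++ xs) =
      t.map (fun _ => match x with | none => "O" | some l => "I-" ++ pvStub l)
        ++ pvRef (some x) xs := by
  induction t with
  | nil => rfl
  | cons y t ih =>
    have hy : y = x := ht y (by simp)
    subst hy
    cases y with
    | none => simpa [pvRef] using ih (fun y hy => ht y (by simp [hy]))
    | some l => simpa [pvRef] using ih (fun y hy => ht y (by simp [hy]))

-- B equals the reference
lemma alt_eq_ref_aux : ∀ (n : Nat) (labels : List (Option String)), labels.length ≤ n →
    get_ner_tags_alt labels = pvRef none labels := by
  intro n
  induction n with
  | zero =>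
    intro labels hlen
    have : labels = [] := List.eq_nil_of_length_eq_zero (Nat.le_zero.mp hlen)
    subst this
    rw [get_ner_tags_alt]; rfl
  | succ n ihn =>
    intro labels hlen
    match labels with
    | [] => rw [get_ner_tags_alt]; rfl
    | key :: rest =>
    set t := rest.takeWhile (· = key) with ht_def
    set r := rest.dropWhile (· = key) with hr_def
    have hrlen : r.length ≤ n := by
      have h := List.length_dropWhile_le (· = key) rest
      rw [← hr_def] at h
      simp only [List.length_cons] at hlen
      omega
    have ih := ihn r hrlen
    rw [get_ner_tags_alt.eq_def]
    dsimp only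
    rw [← ht_def, ← hr_def]
    have hsplit : t ++ r = rest := List.takeWhile_append_dropWhile
    have ht : ∀ y ∈ t, y = key := by
      intro y hy
      simpa using List.mem_takeWhile_imp (p := (· = key)) hy
    have hr : pvRef (some key) r = pvRef none r := by
      apply pvRef_congr
      intro l hl
      constructor
      · intro hk
        exfalso
        have hkey : key = some l := by injection hk
        have hd := List.head?_dropWhile_not (· = key) rest
        rw [← hr_def, hl] at hd
        simp [hkey] at hd
      · intro hq; cases hq
    have hrun : pvRef (some key) rest =
        t.map (fun _ => match key with | none => "O" | some l => "I-" ++ pvStub l)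
          ++ pvRef none r := by
      rw [← hsplit, pvRef_run t key r ht, hr]
    cases key with
    | none =>
      simp only [pvRef, hrun, ih]
      simp only [List.map_const']
      rw [Nat.add_comm, List.replicate_succ]
      simp
    | some l =>
      simp only [pvRef, hrun, ih, pvStub]
      simp [List.map_const']

lemma alt_eq_ref (labels : List (Option String)) :
    get_ner_tags_alt labels = pvRef none labels :=
  alt_eq_ref_aux labels.length labels le_rfl

-- the last element of pre is labels[pre.length - 1]
lemma pyGet_last (pre xs : List (Option String)) (h : pre ≠ []) :
    PySem.List.pyGet? (pre ++ xs) ((pre.length : Int) - 1) = pre.getLast? := by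
  have h0 : (0:Int) ≤ (pre.length : Int) - 1 := by
    have : 0 < pre.length := List.length_pos_iff.mpr h
    omega
  rw [PySem.List.pyGet?_of_nonneg _ h0]
  have hn : ((pre.length : Int) - 1).toNat = pre.length - 1 := by omega
  rw [hn, List.getElem?_append_left (by have := List.length_pos_iff.mpr h; omega)]
  rw [List.getLast?_eq_getElem?]

-- A equals the reference, generalized over a processed prefix
lemma a_gen (labels : List (Option String)) :
    ∀ xs pre acc, pre ++ xs = labels →
      (PySem.List.enumerate xs (pre.length : Int)).foldl (pvStepA labels) acc
      = acc ++ pvRef pre.getLast? xs := by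
  intro xs
  induction xs with
  | nil => intro pre acc _; simp [pvRef, PySem.List.enumerate]
  | cons x xs ih =>
    intro pre acc hpre
    rw [PySem.List.enumerate_cons, List.foldl_cons]
    have hstep :
        pvStepA labels acc ((pre.length : Int), x)
        = acc ++ [(match x with
            | none => "O"
            | some l => if pre.getLast? = some (some l) then "I-" ++ pvStub l else "B-" ++ pvStub l)] := by
      cases x with
      | none => rfl
      | some l =>
        simp only [pvStepA, pvStub]
        rcases List.eq_nil_or_concat' pre with hnil | ⟨p', a, rfl⟩
        · subst hnil
          simp
        · have hpe : (p' ++ [a]) ≠ [] := by simp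
          have hget : PySem.List.pyGet? labels (((p' ++ [a]).length : Int) - 1) = some a := by
            rw [← hpre, pyGet_last _ _ hpe]; simp
          rw [hget]
          simp only [List.getLast?_concat]
          by_cases hax : (a : Option String) = some l
          · subst hax
            rw [if_neg (by push_neg; exact ⟨by simp; omega, rfl⟩), if_pos rfl]
          · rw [if_pos (Or.inr (show ¬((some a : Option (Option String)) = some (some l)) by simpa using hax)),
              if_neg (show ¬((some a : Option (Option String)) = some (some l)) by simpa using hax)]
    rw [hstep]
    have hpre' : (pre ++ [x]) ++ xs = labels := by simpa using hpre
    have hih := ih (pre ++ [x]) (acc ++ [(match x with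
            | none => "O"
            | some l => if pre.getLast? = some (some l) then "I-" ++ pvStub l else "B-" ++ pvStub l)]) hpre'
    simp only [List.length_append, List.length_cons, List.length_nil, Nat.cast_add,
      Nat.cast_one, zero_add, List.getLast?_concat] at hih
    rw [hih]
    simp [pvRef, pvStub]

lemma a_eq_ref (labels : List (Option String)) :
    get_ner_tags labels = pvRef none labels := by
  have := a_gen labels labels [] [] (by simp)
  simpa [get_ner_tags] using this

-- ===== VERDICT (by name: the statement is the Claim_ definition above) =====
theorem get_ner_tags_spec : Claim_equal_get_ner_tags := by
  intro labels _
  unfold Spec_get_ner_tags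
  rw [alt_eq_ref, a_eq_ref]
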